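-- pv_equiv track=rewrite | github.com/nkahlor/code-challenges | solutions/026.py | find_fraction_cycle_length
-- ===== SOURCE A (Python) =====
-- def find_fraction_cycle_length(numerator: int, denominator: int) -> int:
--     remainders_seen: dict[int, int] = {}
--     has_cycle = False
--     i = 0
--     remainder = numerator
--
--     if numerator < denominator:
--         while remainder > 0:
--             remainder *= 10
--             if remainder in remainders_seen:
--                 has_cycle = True
--                 break
--             remainders_seen.setdefault(remainder, i)
--             digit = remainder // denominator
--             remainder -= digit * denominator
--             i += 1
--
--     cycle_length = i - remainders_seen[remainder] if has_cycle else 0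
--     return cycle_length
-- ===== SOURCE B (Python) =====
-- def find_fraction_cycle_length(numerator: int, denominator: int) -> int:
--     # Brent's cycle detection on r -> r*10 % d: no dictionary, O(1) space,
--     # and only O(tail + cycle) iterations.
--     if not (0 < numerator < denominator):
--         return 0
--     power = lam = 1
--     tortoise = numerator
--     hare = numerator * 10 % denominator
--     while tortoise != hare:
--         if hare == 0:
--             return 0
--         if power == lam:
--             tortoise = hare
--             power *= 2
--             lam = 0
--         hare = hare * 10 % denominator
--         lam += 1
--     return lam
-- ===== Notes on version B (the rewrite author's own statement) =====
-- stated objective: alternative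
-- what changed: Replaces the dictionary of all seen remainders by Brent's cycle detection on the map r -> r*10 mod d (tortoise/hare with power-of-two windows), using O(1) space instead of a dict of up to d entries.
import Mathlib
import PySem

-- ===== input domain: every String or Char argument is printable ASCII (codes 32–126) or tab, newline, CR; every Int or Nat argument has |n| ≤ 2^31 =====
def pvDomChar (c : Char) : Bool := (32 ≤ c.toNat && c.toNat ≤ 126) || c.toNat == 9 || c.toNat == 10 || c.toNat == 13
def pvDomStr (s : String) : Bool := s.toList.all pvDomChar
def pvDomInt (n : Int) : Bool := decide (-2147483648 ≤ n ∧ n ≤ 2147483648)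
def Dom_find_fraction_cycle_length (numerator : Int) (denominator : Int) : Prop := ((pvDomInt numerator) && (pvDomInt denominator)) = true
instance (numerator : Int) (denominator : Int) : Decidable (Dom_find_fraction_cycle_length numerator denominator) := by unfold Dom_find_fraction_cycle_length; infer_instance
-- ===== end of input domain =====

-- B replaces A's dictionary of seen remainders by Brent's cycle detection on the
-- map r ↦ r·10 mod d (objective: alternative algorithm, O(1) space instead of a dict).

-- ===== PORT A =====
-- fuel-bounded transliteration of A's while-loop; fuel denominator.toNat + 2 is proved sufficient
def pvLoopA (den : Int) : Nat → PySem.Dict Int Int → Int → Int → Int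
  | 0, _, _, _ => 0
  | fuel+1, seen, i, r =>
    if r > 0 then
      -- remainder *= 10; membership test + final dict lookup fused into one get?
      match seen.get? (r * 10) with
      | some j => i - j
      | none =>
        pvLoopA den fuel (seen.insert (r * 10) i) (i + 1)
          (r * 10 - PySem.Int.floordiv (r * 10) den * den)   -- digit = t//den; r = t - digit*den
    else 0

def find_fraction_cycle_length (numerator : Int) (denominator : Int) : Int :=
  if numerator < denominator then
    pvLoopA denominator (denominator.toNat + 2) PySem.Dict.empty 0 numerator
  else 0

-- ===== PORT B =====
-- Brent's cycle detection: fuel-bounded transliteration of B's while-loop;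
-- fuel denominator.toNat * 4 + 8 is proved sufficient
def pvBrent (den : Int) : Nat → Int → Int → Int → Int → Int
  | 0, _, lam, _, _ => lam
  | fuel+1, power, lam, tortoise, hare =>
    if tortoise ≠ hare then
      if hare = 0 then 0
      else if power = lam then
        -- tortoise = hare; power *= 2; lam = 0; hare = hare*10 % den; lam += 1
        pvBrent den fuel (power * 2) 1 hare (PySem.Int.mod (hare * 10) den)
      else
        pvBrent den fuel power (lam + 1) tortoise (PySem.Int.mod (hare * 10) den)
    else lam

def find_fraction_cycle_length_alt (numerator : Int) (denominator : Int) : Int :=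
  if 0 < numerator ∧ numerator < denominator then
    pvBrent denominator (denominator.toNat * 4 + 8) 1 1 numerator
      (PySem.Int.mod (numerator * 10) denominator)
  else 0

-- ===== PRECONDITION & SPEC =====
def Spec_find_fraction_cycle_length (numerator : Int) (denominator : Int) (out : Int) : Prop := out = find_fraction_cycle_length_alt numerator denominator
instance (numerator : Int) (denominator : Int) (out : Int) : Decidable (Spec_find_fraction_cycle_length numerator denominator out) := by unfold Spec_find_fraction_cycle_length; infer_instance

-- ===== CLAIM (what is proved, stated in full; the proofs are below) =====
def Claim_equal_find_fraction_cycle_length : Prop := ∀ (numerator : Int) (denominator : Int), Dom_find_fraction_cycle_length numerator denominator → Spec_find_fraction_cycle_length numerator denominator (find_fraction_cycle_length numerator denominator)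

-- ===== LEMMAS AND PROOFS =====

-- the remainder sequence both programs walk: x 0 = n, x (k+1) = x k * 10 % d
def pvX (n d : Int) : Nat → Int
  | 0 => n
  | k+1 => PySem.Int.mod (pvX n d k * 10) d

lemma pvX_lt {n d : Int} (hd : 0 < d) (hnd : n < d) : ∀ k, pvX n d k < d
  | 0 => hnd
  | k+1 => PySem.Int.mod_lt _ hd

lemma pvX_pos {n d : Int} (hd : 0 < d) (hn : 0 < n) {m : Nat} (hz : pvX n d m ≠ 0) :
    0 < pvX n d m := by
  cases m with
  | zero => exact hn
  | succ k => exact lt_of_le_of_ne (PySem.Int.mod_nonneg _ hd) (Ne.symm hz)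

lemma pvX_absorb {n d : Int} {i : Nat} (hi : pvX n d i = 0) :
    ∀ j, pvX n d (i + j) = 0 := by
  intro j
  induction j with
  | zero => exact hi
  | succ j ih =>
    show pvX n d (i+j+1) = 0
    simp [pvX, ih, PySem.Int.mod]

lemma pv_sub_floordiv (a d : Int) : a - PySem.Int.floordiv a d * d = PySem.Int.mod a d := by
  have := PySem.Int.floordiv_mul_add_mod a d
  linarith

-- pigeonhole: within the first d.toNat steps the sequence hits 0 or repeats a value
lemma pv_event_exists {n d : Int} (hn : 0 < n) (hnd : n < d) :
    ∃ m, m ≤ d.toNat ∧ (pvX n d m = 0 ∨ ∃ k, k < m ∧ pvX n d k = pvX n d m) := by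
  have hd : 0 < d := lt_trans hn hnd
  by_contra hcon
  push_neg at hcon
  have hmaps : ∀ m ∈ Finset.range (d.toNat + 1), pvX n d m ∈ Finset.Ioo (0:Int) d := by
    intro m hm
    simp only [Finset.mem_range] at hm
    have hm' : m ≤ d.toNat := by omega
    obtain ⟨h1, _⟩ := hcon m hm'
    exact Finset.mem_Ioo.mpr ⟨pvX_pos hd hn h1, pvX_lt hd hnd m⟩
  have hcard : (Finset.Ioo (0:Int) d).card < (Finset.range (d.toNat + 1)).card := by
    rw [Int.card_Ioo, Finset.card_range]
    omega
  obtain ⟨a, ha, b, hb, hab, heq⟩ :=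
    Finset.exists_ne_map_eq_of_card_lt_of_maps_to hcard hmaps
  simp only [Finset.mem_range] at ha hb
  rcases lt_or_gt_of_ne hab with h | h
  · exact (hcon b (by omega)).2 a h heq
  · exact (hcon a (by omega)).2 b h heq.symm

-- descent through A's loop when the first event is hitting remainder 0
lemma pv_descentZero {n d : Int} (hd : 0 < d) (hn : 0 < n) {M : Nat}
    (hminZ : ∀ m, m < M → pvX n d m ≠ 0)
    (hminR : ∀ a b, a < b → b < M → pvX n d a ≠ pvX n d b)
    (hM : pvX n d M = 0) :
    ∀ (fuel m : Nat) (seen : PySem.Dict Int Int), m ≤ M → M < fuel + m →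
      (∀ k, k < m → seen.get? (pvX n d k * 10) = some (k : Int)) →
      (∀ t v, seen.get? t = some v → ∃ k, k < m ∧ t = pvX n d k * 10) →
      pvLoopA d fuel seen (m : Int) (pvX n d m) = 0 := by
  intro fuel
  induction fuel with
  | zero => intro m seen h1 h2 _ _; omega
  | succ fuel ih =>
    intro m seen hmM hfuel I1 I2
    by_cases hm : m = M
    · subst hm
      simp [pvLoopA, hM]
    · have hmM' : m < M := by omega
      have hpos : 0 < pvX n d m := pvX_pos hd hn (hminZ m hmM')
      have hnone : seen.get? (pvX n d m * 10) = none := by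
        cases hg : seen.get? (pvX n d m * 10) with
        | none => rfl
        | some v =>
          obtain ⟨k, hk, hkey⟩ := I2 _ _ hg
          have : pvX n d k = pvX n d m := by linarith
          exact absurd this (hminR k m hk hmM')
      rw [pvLoopA, if_pos hpos, hnone]
      show pvLoopA d fuel (seen.insert (pvX n d m * 10) (m:Int)) ((m:Int) + 1)
          (pvX n d m * 10 - PySem.Int.floordiv (pvX n d m * 10) d * d) = _
      have hrw : pvX n d m * 10 - PySem.Int.floordiv (pvX n d m * 10) d * d = pvX n d (m+1) :=
        pv_sub_floordiv _ _
      rw [hrw]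
      have hcast : (m : Int) + 1 = ((m+1 : Nat) : Int) := by push_cast; ring
      rw [hcast]
      apply ih (m+1) _ (by omega) (by omega)
      · intro k hk
        rcases Nat.lt_succ_iff_lt_or_eq.mp hk with hk' | hk'
        · rw [PySem.Dict.get?_insert]
          have hne : pvX n d k * 10 ≠ pvX n d m * 10 := by
            intro h
            exact hminR k m hk' hmM' (by linarith)
          rw [if_neg hne]
          exact I1 k hk'
        · subst hk'; exact PySem.Dict.get?_insert_self _ _ _
      · intro t v hg
        rw [PySem.Dict.get?_insert] at hg
        split_ifs at hg with ht
        · exact ⟨m, by omega, ht⟩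
        · obtain ⟨k, hk, hkey⟩ := I2 _ _ hg
          exact ⟨k, by omega, hkey⟩

-- descent through A's loop when the first event is a repeated remainder
lemma pv_descentCycle {n d : Int} (hd : 0 < d) (hn : 0 < n) {M K : Nat}
    (hminZ : ∀ m, m < M → pvX n d m ≠ 0) (hzM : pvX n d M ≠ 0)
    (hminR : ∀ a b, a < b → b < M → pvX n d a ≠ pvX n d b)
    (hKM : K < M) (hxK : pvX n d K = pvX n d M) :
    ∀ (fuel m : Nat) (seen : PySem.Dict Int Int), m ≤ M → M < fuel + m →
      (∀ k, k < m → seen.get? (pvX n d k * 10) = some (k : Int)) →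
      (∀ t v, seen.get? t = some v → ∃ k, k < m ∧ t = pvX n d k * 10) →
      pvLoopA d fuel seen (m : Int) (pvX n d m) = (M : Int) - (K : Int) := by
  intro fuel
  induction fuel with
  | zero => intro m seen h1 h2 _ _; omega
  | succ fuel ih =>
    intro m seen hmM hfuel I1 I2
    by_cases hm : m = M
    · rw [hm]
      have hpos : 0 < pvX n d M := pvX_pos hd hn hzM
      have hget : seen.get? (pvX n d M * 10) = some (K : Int) := by
        rw [← hxK]; exact I1 K (by omega)
      rw [pvLoopA, if_pos hpos, hget]
    · have hmM' : m < M := by omega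
      have hpos : 0 < pvX n d m := pvX_pos hd hn (hminZ m hmM')
      have hnone : seen.get? (pvX n d m * 10) = none := by
        cases hg : seen.get? (pvX n d m * 10) with
        | none => rfl
        | some v =>
          obtain ⟨k, hk, hkey⟩ := I2 _ _ hg
          have : pvX n d k = pvX n d m := by linarith
          exact absurd this (hminR k m hk hmM')
      rw [pvLoopA, if_pos hpos, hnone]
      show pvLoopA d fuel (seen.insert (pvX n d m * 10) (m:Int)) ((m:Int) + 1)
          (pvX n d m * 10 - PySem.Int.floordiv (pvX n d m * 10) d * d) = _
      have hrw : pvX n d m * 10 - PySem.Int.floordiv (pvX n d m * 10) d * d = pvX n d (m+1) :=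
        pv_sub_floordiv _ _
      rw [hrw]
      have hcast : (m : Int) + 1 = ((m+1 : Nat) : Int) := by push_cast; ring
      rw [hcast]
      apply ih (m+1) _ (by omega) (by omega)
      · intro k hk
        rcases Nat.lt_succ_iff_lt_or_eq.mp hk with hk' | hk'
        · rw [PySem.Dict.get?_insert]
          have hne : pvX n d k * 10 ≠ pvX n d m * 10 := by
            intro h
            exact hminR k m hk' hmM' (by linarith)
          rw [if_neg hne]
          exact I1 k hk'
        · subst hk'; exact PySem.Dict.get?_insert_self _ _ _
      · intro t v hg
        rw [PySem.Dict.get?_insert] at hg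
        split_ifs at hg with ht
        · exact ⟨m, by omega, ht⟩
        · obtain ⟨k, hk, hkey⟩ := I2 _ _ hg
          exact ⟨k, by omega, hkey⟩

-- once x K = x M (K < M), the sequence is periodic with period M - K from K on
lemma pv_per {n d : Int} {M K : Nat} (hKM : K < M) (hxK : pvX n d K = pvX n d M) :
    ∀ j, K ≤ j → pvX n d (j + (M - K)) = pvX n d j := by
  intro j hj
  induction j, hj using Nat.le_induction with
  | base =>
    have : K + (M - K) = M := by omega
    rw [this, ← hxK]
  | succ j hj ih =>
    have h1 : j + 1 + (M - K) = (j + (M - K)) + 1 := by omega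
    rw [h1]
    show PySem.Int.mod (pvX n d (j + (M-K)) * 10) d = pvX n d (j+1)
    rw [ih]
    rfl

lemma pv_norm {n d : Int} {M K : Nat} (hKM : K < M) (hxK : pvX n d K = pvX n d M) :
    ∀ m, K ≤ m → pvX n d m = pvX n d (K + (m - K) % (M - K)) := by
  intro m
  induction m using Nat.strong_induction_on with
  | _ m ih =>
    intro hm
    by_cases hlt : m < M
    · have h1 : (m - K) % (M - K) = m - K := Nat.mod_eq_of_lt (by omega)
      rw [h1]
      congr 1; omega
    · have h1 : K ≤ m - (M - K) := by omega
      have h2 : m - (M - K) < m := by omega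
      have h3 : pvX n d ((m - (M-K)) + (M - K)) = pvX n d (m - (M-K)) := pv_per hKM hxK _ h1
      have h4 : (m - (M-K)) + (M - K) = m := by omega
      rw [h4] at h3
      rw [h3, ih _ h2 h1]
      congr 1
      have h5 : m - K = ((m - (M-K)) - K) + (M - K) := by omega
      rw [h5, Nat.add_mod_right]

-- A = B on the whole domain
theorem pv_main (n d : Int) : find_fraction_cycle_length n d = find_fraction_cycle_length_alt n d := by
  classical
  by_cases h1 : 0 < n ∧ n < d
  case neg =>
    -- degenerate inputs: both return 0
    unfold find_fraction_cycle_length find_fraction_cycle_length_alt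
    rw [if_neg h1]
    by_cases h2 : n < d
    · rw [if_pos h2]
      have hn : ¬ 0 < n := by tauto
      show pvLoopA d (d.toNat + 1 + 1) PySem.Dict.empty 0 n = 0
      rw [pvLoopA, if_neg (by omega)]
    · rw [if_neg h2]
  case pos =>
    obtain ⟨hn, hnd⟩ := h1
    have hd : 0 < d := lt_trans hn hnd
    have hDd : ((d.toNat : Int)) = d := Int.toNat_of_nonneg (le_of_lt hd)
    set D := d.toNat with hD
    obtain ⟨m0, hm0D, hev0⟩ := pv_event_exists hn hnd
    have hexP : ∃ m, pvX n d m = 0 ∨ ∃ k, k < m ∧ pvX n d k = pvX n d m := ⟨m0, hev0⟩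
    set M := Nat.find hexP with hMdef
    have hPM := Nat.find_spec hexP
    have hmin : ∀ m, m < M → ¬(pvX n d m = 0 ∨ ∃ k, k < m ∧ pvX n d k = pvX n d m) :=
      fun m hm => Nat.find_min hexP hm
    have hMD : M ≤ D := le_trans (Nat.find_min' hexP hev0) hm0D
    have hminZ : ∀ m, m < M → pvX n d m ≠ 0 := fun m hm h => hmin m hm (Or.inl h)
    have hminR : ∀ a b, a < b → b < M → pvX n d a ≠ pvX n d b :=
      fun a b hab hbM h => hmin b hbM (Or.inr ⟨a, hab, h⟩)
    -- unfold both sides to the shared sequence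
    have hA : find_fraction_cycle_length n d = pvLoopA d (D + 2) PySem.Dict.empty ((0:Nat) : Int) (pvX n d 0) := by
      unfold find_fraction_cycle_length
      rw [if_pos hnd]
      rfl
    by_cases hz : pvX n d M = 0
    · -- terminating decimal: both sides return 0
      have hAz : find_fraction_cycle_length n d = 0 := by
        rw [hA]
        exact pv_descentZero hd hn hminZ hminR hz (D+2) 0 PySem.Dict.empty (by omega) (by omega)
          (by intro k hk; omega)
          (by intro t v hg; rw [PySem.Dict.get?_empty] at hg; cases hg)
      have hxD : pvX n d D = 0 := by
        have := pvX_absorb hz (D - M)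
        rwa [show M + (D - M) = D by omega] at this
      have hM1 : 1 ≤ M := by
        rcases Nat.eq_zero_or_pos M with h | h
        · exfalso; rw [h] at hz; exact absurd hz (by simpa [pvX] using (ne_of_gt hn))
        · exact h
      -- Brent's loop hits the zero remainder (hare reaches index M) and returns 0
      have hzero_loop : ∀ (fuel t lam : Nat), 1 ≤ lam → t + lam ≤ M → M < fuel + t + lam →
          pvBrent d fuel ((t : Int) + 1) (lam : Int) (pvX n d t) (pvX n d (t + lam)) = 0 := by
        intro fuel
        induction fuel with
        | zero => intro t lam _ h2 h3; omega
        | succ fuel ih =>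
          intro t lam hlam hhM hfuel
          have htM : t < M := by omega
          have htnz : pvX n d t ≠ 0 := hminZ t htM
          by_cases hhit : t + lam = M
          · have hh0 : pvX n d (t + lam) = 0 := by rw [hhit]; exact hz
            have hne : pvX n d t ≠ pvX n d (t + lam) := by rw [hh0]; exact htnz
            rw [pvBrent, if_pos hne, if_pos hh0]
          · have hhM' : t + lam < M := by omega
            have hne : pvX n d t ≠ pvX n d (t + lam) := hminR t (t + lam) (by omega) hhM'
            have hh0 : pvX n d (t + lam) ≠ 0 := hminZ _ hhM'
            rw [pvBrent, if_pos hne, if_neg hh0]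
            by_cases hpw : ((t : Int) + 1) = (lam : Int)
            · rw [if_pos hpw]
              have hpw' : lam = t + 1 := by omega
              have hp : ((t : Int) + 1) * 2 = (((t + lam : Nat)) : Int) + 1 := by push_cast; omega
              have hh : PySem.Int.mod (pvX n d (t + lam) * 10) d = pvX n d ((t + lam) + 1) := rfl
              rw [hp, hh, show (1 : Int) = ((1 : Nat) : Int) from rfl]
              exact ih (t + lam) 1 le_rfl (by omega) (by omega)
            · rw [if_neg hpw]
              have h1 : (lam : Int) + 1 = (((lam + 1 : Nat)) : Int) := by push_cast; ring
              have hh : PySem.Int.mod (pvX n d (t + lam) * 10) d = pvX n d (t + (lam + 1)) := by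
                rw [show t + (lam + 1) = (t + lam) + 1 from by omega]
                rfl
              rw [h1, hh]
              exact ih t (lam + 1) (by omega) (by omega) (by omega)
      rw [hAz]
      unfold find_fraction_cycle_length_alt
      rw [if_pos ⟨hn, hnd⟩]
      have := hzero_loop (D * 4 + 8) 0 1 le_rfl (by omega) (by omega)
      symm
      simpa [pvX] using this
    · -- repeating decimal
      obtain ⟨K, hKM, hxK⟩ := hPM.resolve_left hz
      set L := M - K with hLdef
      have hL : 0 < L := by omega
      have hAv : find_fraction_cycle_length n d = (M : Int) - (K : Int) := by
        rw [hA]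
        exact pv_descentCycle hd hn hminZ hz hminR hKM hxK (D+2) 0 PySem.Dict.empty (by omega) (by omega)
          (by intro k hk; omega)
          (by intro t v hg; rw [PySem.Dict.get?_empty] at hg; cases hg)
      -- every index from K on maps into [K, M) with nonzero value
      have hnz_all : ∀ m, pvX n d m ≠ 0 := by
        intro m
        by_cases hm : m < M
        · exact hminZ m hm
        · have hKm : K ≤ m := by omega
          rw [pv_norm hKM hxK m hKm]
          have : (m - K) % L < L := Nat.mod_lt _ hL
          by_cases he : K + (m - K) % L < M
          · exact hminZ _ he
          · have : K + (m - K) % L = M := by omega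
            rw [this]; exact hz
      have hdistinct : ∀ a b, a < M → b < M → pvX n d a = pvX n d b → a = b := by
        intro a b ha hb hab
        rcases Nat.lt_trichotomy a b with h | h | h
        · exact absurd hab (hminR a b h hb)
        · exact h
        · exact absurd hab.symm (hminR b a h ha)
      have hper : ∀ t, K ≤ t → pvX n d (t + L) = pvX n d t := fun t ht => pv_per hKM hxK t ht
      -- any forward self-coincidence starts in the cycle and spans a multiple of L
      have heqshift : ∀ a c, 1 ≤ c → pvX n d a = pvX n d (a + c) → K ≤ a ∧ L ∣ c := by
        intro a c hc heq
        have hKa : K ≤ a := by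
          by_contra hKa
          have haM : a < M := by omega
          by_cases hacM : a + c < M
          · exact absurd heq (hminR a (a + c) (by omega) hacM)
          · have hnorm := pv_norm hKM hxK (a + c) (by omega)
            have he : K + (a + c - K) % L < M := by
              have := Nat.mod_lt (a + c - K) hL; omega
            rw [hnorm] at heq
            exact absurd heq (hminR a _ (by omega) he)
        constructor
        · exact hKa
        · rw [pv_norm hKM hxK (a + c) (by omega), pv_norm hKM hxK a hKa] at heq
          have hi1 : K + (a + c - K) % L < M := by
            have := Nat.mod_lt (a + c - K) hL; omega
          have hi2 : K + (a - K) % L < M := by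
            have := Nat.mod_lt (a - K) hL; omega
          have heq' := hdistinct _ _ hi2 hi1 heq
          rw [show a + c - K = a - K + c from by omega] at heq'
          have heq2 : (a - K + c) % L = (a - K) % L := by omega
          have hme : Nat.ModEq L (c + (a - K)) (0 + (a - K)) := by
            show (c + (a - K)) % L = (0 + (a - K)) % L
            rw [Nat.add_comm c, Nat.zero_add]
            exact heq2.symm ▸ heq2
          have := Nat.ModEq.add_right_cancel' (a - K) hme
          exact (Nat.modEq_zero_iff_dvd).mp this
      set Bs : Nat := 2 * (max K (L - 1)) + 1 with hBs
      have hmaxB : K ≤ max K (L - 1) ∧ L - 1 ≤ max K (L - 1) ∧ max K (L - 1) ≤ D := by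
        refine ⟨le_max_left _ _, le_max_right _ _, ?_⟩
        have h1 : K ≤ D := by omega
        have h2 : L - 1 ≤ D := by omega
        exact max_le h1 h2
      -- Brent's loop detects the cycle and returns exactly L
      have hcyc_loop : ∀ (fuel t lam : Nat), 1 ≤ lam → lam ≤ t + 1 → t ≤ Bs →
          (∀ j, 1 ≤ j → j < lam → pvX n d t ≠ pvX n d (t + j)) →
          2 * Bs + 2 < fuel + t + lam →
          pvBrent d fuel ((t : Int) + 1) (lam : Int) (pvX n d t) (pvX n d (t + lam)) = (L : Int) := by
        intro fuel
        induction fuel with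
        | zero => intro t lam h1 h2 h3 _ h5; omega
        | succ fuel ih =>
          intro t lam hlam hlampow htBs hno hfuel
          by_cases hdet : pvX n d t = pvX n d (t + lam)
          · obtain ⟨hKt, hdvd⟩ := heqshift t lam hlam hdet
            have hLlam : L ≤ lam := Nat.le_of_dvd (by omega) hdvd
            have hlamL : lam = L := by
              by_contra hne
              exact hno L hL (by omega) (hper t hKt).symm
            rw [pvBrent, if_neg (not_not_intro hdet), hlamL]
          · rw [pvBrent, if_pos hdet]
            rw [if_neg (hnz_all (t + lam))]
            by_cases hpw : ((t : Int) + 1) = (lam : Int)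
            · rw [if_pos hpw]
              have hpw' : lam = t + 1 := by omega
              -- a fully unsuccessful window means the window was still too small
              have hwin : t < K ∨ t + 1 < L := by
                by_contra hcon
                push_neg at hcon
                obtain ⟨hKt, hLt⟩ := hcon
                rcases Nat.lt_or_ge L lam with h | h
                · exact hno L hL h (hper t hKt).symm
                · have : lam = L := by omega
                  exact hdet (this ▸ (hper t hKt).symm)
              have htBs' : t + lam ≤ Bs := by
                rcases hwin with h | h <;> omega
              have hp : ((t : Int) + 1) * 2 = (((t + lam : Nat)) : Int) + 1 := by push_cast; omega
              have hh : PySem.Int.mod (pvX n d (t + lam) * 10) d = pvX n d ((t + lam) + 1) := rfl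
              rw [hp, hh, show (1 : Int) = ((1 : Nat) : Int) from rfl]
              exact ih (t + lam) 1 le_rfl (by omega) htBs'
                (by intro j hj1 hj2; omega) (by omega)
            · rw [if_neg hpw]
              have h1 : (lam : Int) + 1 = (((lam + 1 : Nat)) : Int) := by push_cast; ring
              have hh : PySem.Int.mod (pvX n d (t + lam) * 10) d = pvX n d (t + (lam + 1)) := by
                rw [show t + (lam + 1) = (t + lam) + 1 from by omega]
                rfl
              rw [h1, hh]
              refine ih t (lam + 1) (by omega) (by omega) htBs ?_ (by omega)
              intro j hj1 hj2
              rcases Nat.lt_or_ge j lam with h | h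
              · exact hno j hj1 h
              · have : j = lam := by omega
                rw [this]; exact hdet
      have hBv : find_fraction_cycle_length_alt n d = (L : Int) := by
        unfold find_fraction_cycle_length_alt
        rw [if_pos ⟨hn, hnd⟩]
        have := hcyc_loop (D * 4 + 8) 0 1 le_rfl (by omega) (by omega)
          (by intro j hj1 hj2; omega) (by omega)
        simpa [pvX] using this
      rw [hAv, hBv]
      omega

-- ===== VERDICT (by name: the statement is the Claim_ definition above) =====
theorem find_fraction_cycle_length_spec : Claim_equal_find_fraction_cycle_length := by
  intro n d _
  unfold Spec_find_fraction_cycle_length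
  exact pv_main n d
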